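-- pv_equiv track=rewrite | github.com/tjhrad/advent-of-code | 2019/day_24/solution.py | biodiversity_rating
-- ===== SOURCE A (Python) =====
-- def biodiversity_rating(grid):
--     points = 1
--     rating = 0
--     for y in range(len(grid)):
--         for x in range(len(grid[0])):
--             if grid[y][x] == 1:
--                 rating += points
--             points *= 2
--     return rating
-- ===== SOURCE B (Python) =====
-- def biodiversity_rating(grid):
--     W = len(grid[0]) if grid else 0
--     rating = 0
--     for row in reversed(grid):
--         for x in reversed(range(W)):
--             rating = rating * 2 + (1 if row[x] == 1 else 0)
--     return rating
-- ===== Notes on version B (the rewrite author's own statement) =====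
-- stated objective: alternative
-- what changed: B reads the grid back-to-front and evaluates it as a binary numeral by Horner's rule (rating = rating*2 + bit), carrying no 'points' multiplier state; A scans forward, doubling a big-int multiplier at every cell and adding it in.
import Mathlib
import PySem

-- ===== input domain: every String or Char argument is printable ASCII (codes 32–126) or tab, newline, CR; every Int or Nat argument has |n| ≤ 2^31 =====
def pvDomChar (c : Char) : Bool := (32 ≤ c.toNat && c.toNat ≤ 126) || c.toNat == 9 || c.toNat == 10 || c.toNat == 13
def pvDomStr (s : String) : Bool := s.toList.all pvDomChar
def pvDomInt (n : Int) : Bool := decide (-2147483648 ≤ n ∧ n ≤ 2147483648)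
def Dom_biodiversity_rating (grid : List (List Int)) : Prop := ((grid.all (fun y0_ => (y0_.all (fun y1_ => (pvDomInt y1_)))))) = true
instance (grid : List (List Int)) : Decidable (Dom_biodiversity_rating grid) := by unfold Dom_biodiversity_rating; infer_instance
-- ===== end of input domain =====

-- B evaluates the grid back-to-front as a binary numeral by Horner's rule
-- (rating = rating*2 + bit), carrying no multiplier state; same cost as A (objective: alternative).

-- ===== PORT A =====
-- state (points, rating); Python: 'rating += points' (if cell == 1) then 'points *= 2'
def biodiversity_rating (grid : List (List Int)) : Int :=
  ((PySem.List.pyRange 0 (grid.length : Int) 1).foldl (fun (st : Int × Int) y =>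
      (PySem.List.pyRange 0 ((PySem.List.pyGetD grid 0 []).length : Int) 1).foldl
        (fun (st : Int × Int) x =>
          (st.1 * 2,
           if PySem.List.pyGetD (PySem.List.pyGetD grid y []) x 0 == 1 then st.2 + st.1 else st.2))
        st)
    ((1 : Int), (0 : Int))).2

-- ===== PORT B =====
-- reversed(grid) / reversed(range(W)) are ported as .reverse of the same lists
def biodiversity_rating_alt (grid : List (List Int)) : Int :=
  let W : Nat := match grid with | [] => 0 | r :: _ => r.length
  grid.reverse.foldl (fun (rating : Int) row =>
      ((PySem.List.pyRange 0 (W : Int) 1).reverse).foldl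
        (fun (rating : Int) x =>
          rating * 2 + (if PySem.List.pyGetD row x 0 == 1 then 1 else 0))
        rating)
    0

-- ===== PRECONDITION & SPEC =====
-- Pre_ excludes ragged grids with a row shorter than the first row, on which Python A
-- raises IndexError (grid[y][x] with x beyond that row); B raises there too.
def Pre_biodiversity_rating (grid : List (List Int)) : Prop :=
  ∀ row ∈ grid, (grid.headD []).length ≤ row.length
instance (grid : List (List Int)) : Decidable (Pre_biodiversity_rating grid) := by
  unfold Pre_biodiversity_rating; infer_instance

def pvWitness_biodiversity_rating : List (List Int) := [[1, 0, 1], [0, 1, 0]]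

def Spec_biodiversity_rating (grid : List (List Int)) (out : Int) : Prop := out = biodiversity_rating_alt grid
instance (grid : List (List Int)) (out : Int) : Decidable (Spec_biodiversity_rating grid out) := by unfold Spec_biodiversity_rating; infer_instance

-- ===== CLAIM (what is proved, stated in full; the proofs are below) =====
def Claim_equal_biodiversity_rating : Prop := ∀ (grid : List (List Int)), Dom_biodiversity_rating grid → Pre_biodiversity_rating grid → Spec_biodiversity_rating grid (biodiversity_rating grid)

-- ===== LEMMAS AND PROOFS =====

-- value of one row truncated to width W, bit x weighted 2^x
def pvRowVal (row : List Int) : Nat → Int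
  | 0 => 0
  | W + 1 => pvRowVal row W + (if PySem.List.pyGetD row (W : Int) 0 == 1 then 2 ^ W else 0)

-- value of a block of rows, least-significant row first
def pvRowsVal (W : Nat) : List (List Int) → Int
  | [] => 0
  | row :: t => pvRowVal row W + 2 ^ W * pvRowsVal W t

-- A's inner loop from state (p, r)
lemma innerA (row : List Int) (W : Nat) (p r : Int) :
    (PySem.List.pyRange 0 (W : Int) 1).foldl
      (fun (st : Int × Int) x =>
        (st.1 * 2, if PySem.List.pyGetD row x 0 == 1 then st.2 + st.1 else st.2)) (p, r)
    = (p * 2 ^ W, r + p * pvRowVal row W) := by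
  induction W generalizing p r with
  | zero => simp [PySem.List.pyRange_one_eq_nil, pvRowVal]
  | succ W ih =>
    rw [show ((W + 1 : Nat) : Int) = (W : Int) + 1 by push_cast; ring,
        PySem.List.pyRange_one_succ_right (by positivity), List.foldl_append, ih]
    simp only [List.foldl_cons, List.foldl_nil, pvRowVal]
    split <;> (simp only [Prod.mk.injEq]; constructor <;> ring)

-- A's outer loop, recast as a fold over the rows themselves
lemma outerA (W : Nat) (rows : List (List Int)) (p r : Int) :
    rows.foldl (fun (st : Int × Int) row =>
        (PySem.List.pyRange 0 (W : Int) 1).foldl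
          (fun (st : Int × Int) x =>
            (st.1 * 2, if PySem.List.pyGetD row x 0 == 1 then st.2 + st.1 else st.2)) st) (p, r)
    = (p * 2 ^ (rows.length * W), r + p * pvRowsVal W rows) := by
  induction rows generalizing p r with
  | nil => simp [pvRowsVal]
  | cons row t ih =>
    rw [List.foldl_cons, innerA, ih, pvRowsVal]
    simp only [Prod.mk.injEq, List.length_cons]
    constructor
    · rw [Nat.succ_mul, pow_add]; ring
    · ring

-- B's inner loop: Horner over the reversed column range
lemma innerB (row : List Int) (W : Nat) (r : Int) :
    ((PySem.List.pyRange 0 (W : Int) 1).reverse).foldl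
      (fun (rating : Int) x =>
        rating * 2 + (if PySem.List.pyGetD row x 0 == 1 then 1 else 0)) r
    = r * 2 ^ W + pvRowVal row W := by
  induction W generalizing r with
  | zero => simp [PySem.List.pyRange_one_eq_nil, pvRowVal]
  | succ W ih =>
    rw [show ((W + 1 : Nat) : Int) = (W : Int) + 1 by push_cast; ring,
        PySem.List.pyRange_one_succ_right (by positivity), List.reverse_append]
    simp only [List.reverse_singleton, List.singleton_append, List.foldl_cons]
    rw [ih]
    simp only [pvRowVal, pow_succ]
    split <;> ring

-- B's outer loop over the reversed rows
lemma outerB (W : Nat) (rows : List (List Int)) (r : Int) :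
    rows.reverse.foldl (fun (rating : Int) row =>
        ((PySem.List.pyRange 0 (W : Int) 1).reverse).foldl
          (fun (rating : Int) x =>
            rating * 2 + (if PySem.List.pyGetD row x 0 == 1 then 1 else 0)) rating) r
    = r * 2 ^ (rows.length * W) + pvRowsVal W rows := by
  induction rows generalizing r with
  | nil => simp [pvRowsVal]
  | cons row t ih =>
    rw [List.reverse_cons, List.foldl_append, ih]
    simp only [List.foldl_cons, List.foldl_nil, innerB, pvRowsVal, List.length_cons]
    rw [Nat.succ_mul, pow_add]
    ring

-- ===== VERDICT (by name: the statement is the Claim_ definition above) =====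
theorem biodiversity_rating_spec : Claim_equal_biodiversity_rating := by
  intro grid _ _
  unfold Spec_biodiversity_rating biodiversity_rating biodiversity_rating_alt
  cases grid with
  | nil => simp [PySem.List.pyRange_one_eq_nil]
  | cons row t =>
    have hrow : PySem.List.pyGetD (row :: t) (0 : Int) [] = row := by
      simp [PySem.List.pyGetD]
    simp only [hrow]
    rw [PySem.List.foldl_pyRange_zero_pyGetD' (row :: t) ([] : List Int)
        (fun (st : Int × Int) (r : List Int) =>
          (PySem.List.pyRange 0 (row.length : Int) 1).foldl
            (fun (st : Int × Int) x =>
              (st.1 * 2, if PySem.List.pyGetD r x 0 == 1 then st.2 + st.1 else st.2)) st)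
        ((1 : Int), (0 : Int)), outerA, outerB]
    simp
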